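-- pv_equiv track=rewrite | github.com/slpaige/hangman-python | Hangman/task/hangman/hangman.py | replace_dash
-- ===== SOURCE A (Python) =====
-- def replace_dash(guess_indexes, guess_char, random_word_dash):
--     new_word = []
--
--     for x, char in enumerate(random_word_dash):
--         if x in guess_indexes:
--             new_word.append(guess_char)
--         else:
--             new_word.append(char)
--     return "".join(new_word)
-- ===== SOURCE B (Python) =====
-- def replace_dash(guess_indexes, guess_char, random_word_dash):
--     new_word = list(random_word_dash)
--     for i in guess_indexes:
--         if 0 <= i < len(new_word):
--             new_word[i] = guess_char
--     return "".join(new_word)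
-- ===== Notes on version B (the rewrite author's own statement) =====
-- stated objective: faster
-- what changed: Instead of scanning every character and testing membership in guess_indexes, B copies the string into a mutable list once and assigns guess_char at each (bounds-checked) index, removing the per-character linear membership scan.
import Mathlib
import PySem

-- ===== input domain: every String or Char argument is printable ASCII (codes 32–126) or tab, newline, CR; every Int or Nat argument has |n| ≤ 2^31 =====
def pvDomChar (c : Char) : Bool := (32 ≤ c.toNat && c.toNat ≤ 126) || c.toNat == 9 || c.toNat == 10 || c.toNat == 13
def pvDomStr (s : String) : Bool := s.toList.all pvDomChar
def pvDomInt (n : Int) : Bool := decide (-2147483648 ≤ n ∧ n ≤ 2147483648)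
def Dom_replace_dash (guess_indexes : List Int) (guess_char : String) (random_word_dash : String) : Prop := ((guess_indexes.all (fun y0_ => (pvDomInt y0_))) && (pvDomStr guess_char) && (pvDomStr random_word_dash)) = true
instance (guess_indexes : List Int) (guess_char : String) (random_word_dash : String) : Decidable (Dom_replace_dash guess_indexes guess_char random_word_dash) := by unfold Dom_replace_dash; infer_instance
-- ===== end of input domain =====

-- B replaces the per-character membership scan over guess_indexes by a single pass that
-- assigns guess_char at each in-range index of a mutable copy of the string (faster as measured).

-- ===== PORT A =====
def replace_dash (guess_indexes : List Int) (guess_char : String) (random_word_dash : String) : String :=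
  let new_word : List String :=
    (PySem.List.enumerate random_word_dash.toList).foldl
      (fun acc p => if p.1 ∈ guess_indexes then acc ++ [guess_char] else acc ++ [String.mk [p.2]])
      []
  PySem.Str.join "" new_word

-- ===== PORT B =====
def replace_dash_alt (guess_indexes : List Int) (guess_char : String) (random_word_dash : String) : String :=
  let new_word : List String := random_word_dash.toList.map (fun c => String.mk [c])
  let final : List String :=
    guess_indexes.foldl
      (fun l i => if 0 ≤ i ∧ i < (l.length : Int) then l.set i.toNat guess_char else l)
      new_word
  PySem.Str.join "" final

-- ===== PRECONDITION & SPEC =====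
def Spec_replace_dash (guess_indexes : List Int) (guess_char : String) (random_word_dash : String) (out : String) : Prop := out = replace_dash_alt guess_indexes guess_char random_word_dash
instance (guess_indexes : List Int) (guess_char : String) (random_word_dash : String) (out : String) : Decidable (Spec_replace_dash guess_indexes guess_char random_word_dash out) := by unfold Spec_replace_dash; infer_instance

-- ===== CLAIM (what is proved, stated in full; the proofs are below) =====
def Claim_equal_replace_dash : Prop := ∀ (guess_indexes : List Int) (guess_char : String) (random_word_dash : String), Dom_replace_dash guess_indexes guess_char random_word_dash → Spec_replace_dash guess_indexes guess_char random_word_dash (replace_dash guess_indexes guess_char random_word_dash)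

-- ===== LEMMAS AND PROOFS =====

-- A's fold appends one element per character: it is a map over the enumeration.
theorem foldlA_eq_map (gi : List Int) (gc : String)
    (l : List (Int × Char)) (acc : List String) :
    l.foldl (fun acc p => if p.1 ∈ gi then acc ++ [gc] else acc ++ [String.mk [p.2]]) acc
      = acc ++ l.map (fun p => if p.1 ∈ gi then gc else String.mk [p.2]) := by
  induction l generalizing acc with
  | nil => simp
  | cons h t ih => simp [List.foldl_cons, ih]; split <;> simp

-- B's fold of guarded `set`s over the indexes, characterised pointwise.
theorem foldlB_eq_mapIdx (gc : String) (gi : List Int) (init : List String) :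
    gi.foldl (fun l i => if 0 ≤ i ∧ i < (l.length : Int) then l.set i.toNat gc else l) init
      = init.mapIdx (fun j s => if (j : Int) ∈ gi then gc else s) := by
  induction gi generalizing init with
  | nil =>
    apply List.ext_getElem <;> simp
  | cons i rest ih =>
    rw [List.foldl_cons, ih]
    apply List.ext_getElem
    · by_cases h : 0 ≤ i ∧ i < (init.length : Int) <;> simp [h]
    · intro j hj hj'
      by_cases h : 0 ≤ i ∧ i < (init.length : Int) <;>
        simp only [h, if_false, List.getElem_mapIdx, List.mem_cons]
      · by_cases hr : (j : Int) ∈ rest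
        · simp [hr]
        · by_cases he : i.toNat = j
          · have : (j : Int) = i := by omega
            simp [he, this]
          · have : ¬ (j : Int) = i := by omega
            simp [he, this]
      · have : ¬ (j : Int) = i := by
          simp only [List.length_mapIdx] at hj'
          omega
        simp [this]

-- ===== VERDICT (by name: the statement is the Claim_ definition above) =====
theorem replace_dash_spec : Claim_equal_replace_dash := by
  intro gi gc rwd _
  unfold Spec_replace_dash replace_dash replace_dash_alt
  simp only [foldlA_eq_map, foldlB_eq_mapIdx, List.nil_append]
  congr 1
  apply List.ext_getElem
  · simp [PySem.List.length_enumerate]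
  · intro j hj hj'
    simp [PySem.List.getElem_enumerate, List.getElem_mapIdx]
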